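-- pv_equiv track=rewrite | github.com/egavrin/devagent | ai_dev_agent/tools/filesystem/search_replace.py | _find_with_trailing_ws_tolerance
-- ===== SOURCE A (Python) =====
-- def _find_with_trailing_ws_tolerance(
--     content: str, old_lines: list[str], start_pos: int
-- ) -> tuple[int, int, str] | None:
--     """Find match with trailing whitespace stripped from each line."""
--     content_lines = content.splitlines(keepends=True)
--     stripped_old = [line.rstrip() for line in old_lines]
--
--     for i in range(len(content_lines) - len(old_lines) + 1):
--         chunk = content_lines[i : i + len(old_lines)]
--         chunk_stripped = [line.rstrip() for line in chunk]
--
--         if stripped_old == chunk_stripped: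
--             # Calculate character positions
--             char_pos = sum(len(content_lines[j]) for j in range(i))
--             char_end = char_pos + sum(len(line) for line in chunk)
--             matched_text = "".join(chunk).rstrip("\n")
--             return char_pos, char_end, matched_text
--
--     return None
-- ===== SOURCE B (Python) =====
-- def _find_with_trailing_ws_tolerance(
--     content: str, old_lines: list[str], start_pos: int
-- ) -> tuple[int, int, str] | None:
--     """Knuth-Morris-Pratt search over the rstripped line sequences: build the
--     failure table for the stripped pattern, stream the stripped content lines
--     through the automaton once, and read character offsets from a prefix-sum
--     table when the automaton reaches a full match."""
--     content_lines = content.splitlines(keepends=True)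
--     if not old_lines:
--         return (0, 0, "")
--     pattern = [line.rstrip() for line in old_lines]
--     text = [line.rstrip() for line in content_lines]
--     m = len(pattern)
--     fail = [0] * m
--     k = 0
--     for q in range(1, m):
--         while k > 0 and pattern[k] != pattern[q]:
--             k = fail[k - 1]
--         if pattern[k] == pattern[q]:
--             k += 1
--         fail[q] = k
--     pre = [0]
--     for line in content_lines:
--         pre.append(pre[-1] + len(line))
--     k = 0
--     for i, line in enumerate(text):
--         while k > 0 and pattern[k] != line:
--             k = fail[k - 1]
--         if pattern[k] == line:
--             k += 1
--         if k == m: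
--             s = i + 1 - m
--             return (pre[s], pre[s + m],
--                     "".join(content_lines[s:s + m]).rstrip("\n"))
--     return None
-- ===== Notes on version B (the rewrite author's own statement) =====
-- stated objective: alternative
-- what changed: B replaces A's sliding-window rescan (slice, re-strip and compare an m-line chunk at every position) by a Knuth-Morris-Pratt automaton over the once-stripped line sequences: a failure table for the stripped pattern, one streaming pass of the stripped content lines through it, and character offsets read from a prefix-sum table; it trades A's C-level chunk slicing for a worst-case-linear number of line comparisons.
import Mathlib
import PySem

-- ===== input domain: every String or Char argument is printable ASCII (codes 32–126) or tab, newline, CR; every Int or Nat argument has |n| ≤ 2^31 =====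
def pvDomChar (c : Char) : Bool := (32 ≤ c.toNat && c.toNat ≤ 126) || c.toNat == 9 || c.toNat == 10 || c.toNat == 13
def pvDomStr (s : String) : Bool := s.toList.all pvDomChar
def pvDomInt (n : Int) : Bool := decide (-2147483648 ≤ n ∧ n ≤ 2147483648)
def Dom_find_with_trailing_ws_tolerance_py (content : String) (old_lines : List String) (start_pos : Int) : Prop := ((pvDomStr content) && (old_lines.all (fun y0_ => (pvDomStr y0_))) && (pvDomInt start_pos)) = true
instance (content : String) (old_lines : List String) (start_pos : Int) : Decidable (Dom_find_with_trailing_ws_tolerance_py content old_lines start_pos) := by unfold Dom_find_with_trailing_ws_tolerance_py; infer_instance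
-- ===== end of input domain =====

-- B replaces A's sliding-window rescan by a Knuth-Morris-Pratt automaton over the once-stripped
-- line sequences, reading character offsets from a prefix-sum table (objective: alternative).

-- shared builtin helpers: exact ports of Python builtins both versions call.
-- exact port of str.splitlines(keepends=True) on the Dom alphabet: the only line breaks
-- occurring in Dom strings are '\n', '\r' and '\r\n' (no other Unicode break can appear).
def pvSplitKeepGo (acc : List Char) : List Char → List (List Char)
  | [] => if acc = [] then [] else [acc.reverse]
  | '\r' :: '\n' :: rest => (acc.reverse ++ ['\r', '\n']) :: pvSplitKeepGo [] rest
  | '\r' :: rest => (acc.reverse ++ ['\r']) :: pvSplitKeepGo [] rest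
  | '\n' :: rest => (acc.reverse ++ ['\n']) :: pvSplitKeepGo [] rest
  | c :: rest => pvSplitKeepGo (c :: acc) rest

def pvSplitlinesKeepends (s : String) : List String :=
  (pvSplitKeepGo [] s.toList).map String.ofList

-- exact port of str.rstrip("\n") (drops trailing '\n' characters only)
def pvRstripNl (s : String) : String :=
  String.ofList ((s.toList.reverse.dropWhile (· == '\n')).reverse)

-- ===== PORT A =====
def pvLoopA (cl so : List String) (m : Int) : List Int → Option (Int × Int × String)
  | [] => none
  | i :: rest =>
    let chunk := PySem.List.slice cl (some i) (some (i + m))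
    let chunk_stripped := chunk.map PySem.Str.rstrip
    if so = chunk_stripped then
      let char_pos := ((PySem.List.pyRange 0 i 1).map
        (fun j => (PySem.Str.len (PySem.List.pyGetD cl j "") : Int))).sum
      let char_end := char_pos + (chunk.map (fun line => (PySem.Str.len line : Int))).sum
      some (char_pos, char_end, pvRstripNl (PySem.Str.join "" chunk))
    else pvLoopA cl so m rest

def find_with_trailing_ws_tolerance_py (content : String) (old_lines : List String) (start_pos : Int) : Option (Int × Int × String) :=
  let content_lines := pvSplitlinesKeepends content
  let stripped_old := old_lines.map PySem.Str.rstrip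
  pvLoopA content_lines stripped_old (old_lines.length : Int)
    (PySem.List.pyRange 0 ((content_lines.length : Int) - (old_lines.length : Int) + 1) 1)

-- ===== PORT B =====
-- the `while k > 0 and pattern[k] != c: k = fail[k-1]` loop; fuel = the entry value of k
-- (each iteration strictly decreases k for the table B builds, so fuel k is enough)
def pvShift (pat : List String) (fail : List Nat) (c : String) : Nat → Nat → Nat
  | 0, k => k
  | fuel+1, k =>
    if k ≠ 0 ∧ ¬ pat.getD k "" = c then pvShift pat fail c fuel (fail.getD (k-1) 0) else k

-- one automaton step: the while loop, then `if pattern[k] == c: k += 1`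
def pvStep (pat : List String) (fail : List Nat) (k : Nat) (c : String) : Nat :=
  let k' := pvShift pat fail c k k
  if pat.getD k' "" = c then k' + 1 else k'

-- one iteration of the failure-table loop body: k = step …; fail[q] = k
def pvBuildStep (pat : List String) (st : List Nat × Nat) (q : Nat) : List Nat × Nat :=
  let k := pvStep pat st.1 st.2 (pat.getD q "")
  (st.1.set q k, k)

-- `fail = [0]*m; k = 0; for q in range(1, m): …`
def pvBuildFail (pat : List String) : List Nat × Nat :=
  (List.range' 1 (pat.length - 1)).foldl (pvBuildStep pat) (List.replicate pat.length 0, 0)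

-- the tuple returned by B at a match starting at line s
def pvOutKmp (cl : List String) (pre : List Int) (m s : Nat) : Int × Int × String :=
  (PySem.List.pyGetD pre (s : Int) 0,
   PySem.List.pyGetD pre ((s : Int) + (m : Int)) 0,
   pvRstripNl (PySem.Str.join "" (PySem.List.slice cl (some (s : Int)) (some ((s : Int) + (m : Int))))))

-- `for i, line in enumerate(text): … if k == m: return …`
def pvScanKmp (pat : List String) (fail : List Nat) (m : Nat) (cl : List String)
    (pre : List Int) : Nat → Nat → List String → Option (Int × Int × String)
  | _, _, [] => none
  | k, i, line :: rest =>
    let k' := pvStep pat fail k line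
    if k' = m then some (pvOutKmp cl pre m (i + 1 - m))
    else pvScanKmp pat fail m cl pre k' (i+1) rest

def find_with_trailing_ws_tolerance_py_alt (content : String) (old_lines : List String) (start_pos : Int) : Option (Int × Int × String) :=
  let content_lines := pvSplitlinesKeepends content
  if old_lines = [] then some (0, 0, "") else
  let pattern := old_lines.map PySem.Str.rstrip
  let text := content_lines.map PySem.Str.rstrip
  let m := pattern.length
  let fail := (pvBuildFail pattern).1
  let pre := content_lines.foldl
    (fun pre line => pre ++ [PySem.List.pyGetD pre (-1) 0 + (PySem.Str.len line : Int)]) [0]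
  pvScanKmp pattern fail m content_lines pre 0 0 text

-- ===== PRECONDITION & SPEC =====
def Spec_find_with_trailing_ws_tolerance_py (content : String) (old_lines : List String) (start_pos : Int) (out : Option (Int × Int × String)) : Prop := out = find_with_trailing_ws_tolerance_py_alt content old_lines start_pos
instance (content : String) (old_lines : List String) (start_pos : Int) (out : Option (Int × Int × String)) : Decidable (Spec_find_with_trailing_ws_tolerance_py content old_lines start_pos out) := by unfold Spec_find_with_trailing_ws_tolerance_py; infer_instance

-- ===== CLAIM (what is proved, stated in full; the proofs are below) =====
def Claim_equal_find_with_trailing_ws_tolerance_py : Prop := ∀ (content : String) (old_lines : List String) (start_pos : Int), Dom_find_with_trailing_ws_tolerance_py content old_lines start_pos → Spec_find_with_trailing_ws_tolerance_py content old_lines start_pos (find_with_trailing_ws_tolerance_py content old_lines start_pos)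

-- ===== LEMMAS AND PROOFS =====

-- ---- proof-only helpers ----
def pvLen (s : String) : Int := (PySem.Str.len s : Int)

def pvS (cl : List String) (k : Nat) : Int := ((cl.map pvLen).take k).sum

def pvScanSums : List String → Int → List Int
  | [], _ => []
  | l :: ls, s => (s + pvLen l) :: pvScanSums ls (s + pvLen l)

def pvOutA (cl : List String) (m : Int) (i : Int) : Int × Int × String :=
  let chunk := PySem.List.slice cl (some i) (some (i + m))
  let char_pos := ((PySem.List.pyRange 0 i 1).map
    (fun j => (PySem.Str.len (PySem.List.pyGetD cl j "") : Int))).sum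
  (char_pos, char_pos + (chunk.map (fun line => (PySem.Str.len line : Int))).sum,
   pvRstripNl (PySem.Str.join "" chunk))

-- "P.take j is a suffix of t" (a partial match of length j ending at the current position)
def pvSp (P : List String) (j : Nat) (t : List String) : Prop := j ≤ P.length ∧ P.take j <:+ t

-- the failure table is correct on indices q with q+1 ≤ Q
def pvTableOK (P : List String) (F : List Nat) (Q : Nat) : Prop :=
  ∀ q : Nat, q + 1 ≤ Q →
    F.getD q 0 ≤ q ∧ pvSp P (F.getD q 0) (P.take (q+1)) ∧
    (∀ j, j ≤ q → pvSp P j (P.take (q+1)) → j ≤ F.getD q 0)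

theorem pvLoopA_eq (cl so : List String) (m : Int) (L : List Int) :
    pvLoopA cl so m L =
      (L.find? (fun i => decide (so = (PySem.List.slice cl (some i) (some (i + m))).map PySem.Str.rstrip))).map
        (pvOutA cl m) := by
  induction L with
  | nil => simp [pvLoopA]
  | cons i rest ih =>
    by_cases h : so = (PySem.List.slice cl (some i) (some (i + m))).map PySem.Str.rstrip
    · simp [pvLoopA, h, pvOutA]
    · simp [pvLoopA, h, ih]

theorem pvLastGet (a : List Int) (x : Int) : PySem.List.pyGetD (a ++ [x]) (-1) 0 = x := by
  simp [PySem.List.pyGetD, PySem.List.pyGet?, PySem.List.pyIdx?]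

theorem pvPreFold (cl : List String) (acc : List Int) (x : Int) :
    cl.foldl (fun pre line => pre ++ [PySem.List.pyGetD pre (-1) 0 + (PySem.Str.len line : Int)])
        (acc ++ [x]) = (acc ++ [x]) ++ pvScanSums cl x := by
  induction cl generalizing acc x with
  | nil => simp [pvScanSums]
  | cons l ls ih =>
    simp only [List.foldl_cons, pvLastGet]
    rw [show x + (PySem.Str.len l : Int) = x + pvLen l from rfl,
        ih (acc ++ [x]) (x + pvLen l)]
    simp [pvScanSums]

theorem pvPre_eq (cl : List String) :
    cl.foldl (fun pre line => pre ++ [PySem.List.pyGetD pre (-1) 0 + (PySem.Str.len line : Int)]) [0]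
      = 0 :: pvScanSums cl 0 := by
  have h := pvPreFold cl [] 0
  simpa using h

theorem pvS_cons (l : String) (ls : List String) (j : Nat) :
    pvS (l :: ls) (j + 1) = pvLen l + pvS ls j := by
  simp [pvS]

theorem pvScanSums_get (cl : List String) (s : Int) (k : Nat) (h : k < cl.length) :
    (pvScanSums cl s)[k]? = some (s + pvS cl (k + 1)) := by
  induction cl generalizing s k with
  | nil => simp at h
  | cons l ls ih =>
    cases k with
    | zero => simp [pvScanSums, pvS]
    | succ j =>
      have hj : j < ls.length := by simpa using h
      simp only [pvScanSums, List.getElem?_cons_succ]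
      rw [ih (s + pvLen l) j hj, pvS_cons]
      congr 1
      ring

theorem pvPre_get (cl : List String) (k : Nat) (h : k ≤ cl.length) :
    PySem.List.pyGetD
      (cl.foldl (fun pre line => pre ++ [PySem.List.pyGetD pre (-1) 0 + (PySem.Str.len line : Int)]) [0])
      (k : Int) 0 = pvS cl k := by
  rw [pvPre_eq, PySem.List.pyGetD_natCast]
  cases k with
  | zero => simp [pvS]
  | succ j =>
    have hj : j < cl.length := by omega
    simp only [List.getD, List.getElem?_cons_succ]
    rw [pvScanSums_get cl 0 j hj]
    simp

theorem pvSumA (cl : List String) (k : Nat) (h : k ≤ cl.length) :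
    ((PySem.List.pyRange 0 (k : Int) 1).map
      (fun j => (PySem.Str.len (PySem.List.pyGetD cl j "") : Int))).sum = pvS cl k := by
  induction k with
  | zero => simp [PySem.List.pyRange_one_eq_nil (le_refl (0 : Int)), pvS]
  | succ j ih =>
    have hj : j < cl.length := by omega
    have hcast : ((j + 1 : Nat) : Int) = (j : Int) + 1 := by push_cast; ring
    rw [hcast, PySem.List.pyRange_one_succ_right (by positivity)]
    rw [List.map_append, List.sum_append, ih (by omega)]
    have h1 : PySem.List.pyGetD cl ((j : Nat) : Int) "" = cl.getD j "" :=
      PySem.List.pyGetD_natCast cl j ""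
    have h2 : cl.getD j "" = cl[j] := List.getD_eq_getElem cl "" hj
    have h3 : pvS cl (j + 1) = pvS cl j + pvLen cl[j] := by
      have h4 := List.sum_take_succ (cl.map pvLen) j (by simpa using hj)
      simpa [pvS] using h4
    simp [h1, h3, pvLen]
    simp [List.getElem?_eq_getElem hj]

theorem pvSliceMap (cl : List String) (k m' : Nat) :
    (PySem.List.slice cl (some (k : Int)) (some ((k : Int) + (m' : Int)))).map PySem.Str.rstrip
      = PySem.List.slice (cl.map PySem.Str.rstrip) (some (k : Int)) (some ((k : Int) + (m' : Int))) := by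
  rw [PySem.List.slice_natCast_add, PySem.List.slice_natCast_add, List.map_take, List.map_drop]

theorem pvTakeAddSum (cl : List String) (k m' : Nat) :
    pvS cl (k + m') = pvS cl k + (((cl.map pvLen).drop k).take m').sum := by
  simp [pvS, List.take_add]

-- ---- KMP theory ----

theorem pvSp_zero (P : List String) (t : List String) : pvSp P 0 t :=
  ⟨Nat.zero_le _, by simp⟩

theorem pvSuffix_snoc {u t : List String} {x c : String} :
    u ++ [x] <:+ t ++ [c] ↔ x = c ∧ u <:+ t := by
  rw [← List.reverse_prefix, List.reverse_append, List.reverse_append]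
  simp [List.cons_prefix_cons, List.reverse_prefix]

theorem pvTake_snoc (P : List String) (q : Nat) (h : q < P.length) :
    P.take q ++ [P.getD q ""] = P.take (q+1) := by
  rw [List.take_add_one]
  rw [List.getElem?_eq_getElem h]
  rw [List.getD_eq_getElem P "" h]
  rfl

theorem pvSp_succ_iff (P : List String) (j : Nat) (t : List String) (c : String) :
    pvSp P (j+1) (t ++ [c]) ↔ j + 1 ≤ P.length ∧ P.getD j "" = c ∧ P.take j <:+ t := by
  constructor
  · rintro ⟨h1, h2⟩
    have hj : j < P.length := h1
    rw [← pvTake_snoc P j hj] at h2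
    obtain ⟨hx, hu⟩ := pvSuffix_snoc.mp h2
    exact ⟨h1, hx, hu⟩
  · rintro ⟨h1, h2, h3⟩
    refine ⟨h1, ?_⟩
    rw [← pvTake_snoc P j h1]
    exact pvSuffix_snoc.mpr ⟨h2, h3⟩

theorem pvTableOK_mono (P : List String) (F : List Nat) (Q Q' : Nat)
    (h : pvTableOK P F Q) (hq : Q' ≤ Q) : pvTableOK P F Q' :=
  fun q hq' => h q (le_trans hq' hq)

theorem pvShift_lemma (P : List String) (F : List Nat) (c : String) (t : List String) (B : Nat) :
    ∀ fuel k, k ≤ fuel → pvTableOK P F k → k < P.length → pvSp P k t → k + 1 ≤ B →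
      (∀ j, j ≤ B → pvSp P j (t ++ [c]) → j ≤ k + 1) →
      pvSp P (pvShift P F c fuel k) t ∧ pvShift P F c fuel k ≤ k ∧
      pvShift P F c fuel k < P.length ∧
      (∀ j, j ≤ B → pvSp P j (t ++ [c]) → j ≤ pvShift P F c fuel k + 1) ∧
      (pvShift P F c fuel k = 0 ∨ P.getD (pvShift P F c fuel k) "" = c) := by
  intro fuel
  induction fuel with
  | zero =>
    intro k hk hF hkm hsp hkB hub
    have : k = 0 := by omega
    subst this
    simp only [pvShift]
    exact ⟨hsp, le_refl _, hkm, hub, Or.inl (by trivial)⟩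
  | succ fuel ih =>
    intro k hk hF hkm hsp hkB hub
    by_cases h : k ≠ 0 ∧ ¬ P.getD k "" = c
    · have hkpos : k ≠ 0 := h.1
      have hTk := hF (k-1) (by omega)
      rw [show k - 1 + 1 = k by omega] at hTk
      obtain ⟨hT1, hT2, hT3⟩ := hTk
      set k2 := F.getD (k-1) 0 with hk2def
      have hstep : pvShift P F c (fuel+1) k = pvShift P F c fuel k2 := by
        simp only [pvShift, if_pos h]
        rw [← hk2def]
      rw [hstep]
      have hk2 : k2 ≤ k - 1 := hT1
      have hsp2 : pvSp P k2 t := ⟨hT2.1, hT2.2.trans hsp.2⟩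
      have hub2 : ∀ j, j ≤ B → pvSp P j (t ++ [c]) → j ≤ k2 + 1 := by
        intro j hjB hjsp
        cases j with
        | zero => omega
        | succ j' =>
          have hjk := hub _ hjB hjsp
          obtain ⟨hj1, hj2, hj3⟩ := (pvSp_succ_iff P j' t c).mp hjsp
          have hj'k : j' ≠ k := by
            intro hEq; exact h.2 (hEq ▸ hj2)
          have hj'lt : j' ≤ k - 1 := by omega
          have hsuf : P.take j' <:+ P.take k :=
            List.suffix_of_suffix_length_le hj3 hsp.2
              (by
                rw [List.length_take, List.length_take]
                omega)
          have := hT3 j' hj'lt ⟨by omega, hsuf⟩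
          omega
      have hres := ih k2 (by omega) (pvTableOK_mono P F k k2 hF (by omega)) (by omega) hsp2
        (by omega) hub2
      exact ⟨hres.1, le_trans hres.2.1 (by omega), hres.2.2.1, hres.2.2.2⟩
    · have hstep : pvShift P F c (fuel+1) k = k := by
        simp only [pvShift, if_neg h]
      rw [hstep]
      refine ⟨hsp, le_refl _, hkm, hub, ?_⟩
      by_cases hk0 : k = 0
      · exact Or.inl hk0
      · right
        by_contra hc
        exact h ⟨hk0, hc⟩

theorem pvStep_lemma (P : List String) (F : List Nat) (c : String) (t : List String) (B k : Nat)
    (hF : pvTableOK P F k) (hkm : k < P.length) (hsp : pvSp P k t) (hkB : k + 1 ≤ B)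
    (hub : ∀ j, j ≤ B → pvSp P j (t ++ [c]) → j ≤ k + 1) :
    pvSp P (pvStep P F k c) (t ++ [c]) ∧ pvStep P F k c ≤ k + 1 ∧
    (∀ j, j ≤ B → pvSp P j (t ++ [c]) → j ≤ pvStep P F k c) := by
  obtain ⟨s1, s2, s3, s4, s5⟩ := pvShift_lemma P F c t B k k (le_refl k) hF hkm hsp hkB hub
  set k' := pvShift P F c k k with hk'def
  by_cases hc : P.getD k' "" = c
  · have hstep : pvStep P F k c = k' + 1 := by
      simp only [pvStep, ← hk'def, if_pos hc]
    rw [hstep]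
    refine ⟨(pvSp_succ_iff P k' t c).mpr ⟨s3, hc, s1.2⟩, by omega, ?_⟩
    intro j hjB hjsp
    exact s4 j hjB hjsp
  · have hk0 : k' = 0 := by
      rcases s5 with h0 | h1
      · exact h0
      · exact absurd h1 hc
    have hstep : pvStep P F k c = k' := by
      simp only [pvStep, ← hk'def, if_neg hc]
    rw [hstep, hk0]
    refine ⟨pvSp_zero P _, by omega, ?_⟩
    intro j hjB hjsp
    cases j with
    | zero => omega
    | succ j' =>
      have := s4 _ hjB hjsp
      have hj' : j' = 0 := by omega
      subst hj'
      obtain ⟨h1, h2, h3⟩ := (pvSp_succ_iff P 0 t c).mp hjsp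
      rw [hk0] at hc
      exact absurd h2 hc

theorem pvGetD_set_ne (l : List Nat) (i j : Nat) (v : Nat) (h : i ≠ j) :
    (l.set i v).getD j 0 = l.getD j 0 := by
  simp [List.getD, h]

theorem pvGetD_set_self (l : List Nat) (i : Nat) (v : Nat) (h : i < l.length) :
    (l.set i v).getD i 0 = v := by
  simp [List.getD, h]

theorem pvBuild_inv (P : List String) (hP : P ≠ []) :
    ∀ c, c + 1 ≤ P.length →
      ((List.range' 1 c).foldl (pvBuildStep P) (List.replicate P.length 0, 0)).1.length = P.length ∧
      pvTableOK P ((List.range' 1 c).foldl (pvBuildStep P) (List.replicate P.length 0, 0)).1 (c+1) ∧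
      ((List.range' 1 c).foldl (pvBuildStep P) (List.replicate P.length 0, 0)).2 =
        ((List.range' 1 c).foldl (pvBuildStep P) (List.replicate P.length 0, 0)).1.getD c 0 := by
  intro c
  induction c with
  | zero =>
    intro _
    have hlen : (0:Nat) < P.length := List.length_pos_of_ne_nil hP
    refine ⟨by simp, ?_, ?_⟩
    · intro q hq
      have hq0 : q = 0 := by omega
      subst hq0
      simp only [List.range'_zero, List.foldl_nil]
      have : (List.replicate P.length (0:Nat)).getD 0 0 = 0 := by
        simp [List.getD, hlen]
      rw [this]
      exact ⟨le_refl _, pvSp_zero P _, fun j hj _ => hj⟩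
    · simp [List.getD, hlen]
  | succ c ih =>
    intro hc1
    have hc : c + 1 ≤ P.length := by omega
    obtain ⟨ihlen, ihT, ihk⟩ := ih hc
    set st := (List.range' 1 c).foldl (pvBuildStep P) (List.replicate P.length 0, 0) with hst
    have hfold : (List.range' 1 (c+1)).foldl (pvBuildStep P) (List.replicate P.length 0, 0)
        = pvBuildStep P st (1 + c) := by
      rw [List.range'_concat]
      simp [hst]
    have h1c : 1 + c = c + 1 := by omega
    rw [hfold, h1c]
    -- facts about the current k = st.2
    have hTc := ihT c (by omega)
    obtain ⟨hT1, hT2, hT3⟩ := hTc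
    have hk_le : st.2 ≤ c := ihk ▸ hT1
    have hkm : st.2 < P.length := by omega
    have hc1lt : c + 1 < P.length := by omega
    have hsnoc : P.take (c+1) ++ [P.getD (c+1) ""] = P.take (c+2) := pvTake_snoc P (c+1) hc1lt
    have hstep := pvStep_lemma P st.1 (P.getD (c+1) "") (P.take (c+1)) (c+1) st.2
      (pvTableOK_mono P st.1 (c+1) st.2 ihT (by omega))
      hkm (ihk ▸ hT2) (by omega)
      (by
        intro j hjB hjsp
        cases j with
        | zero => omega
        | succ j' =>
          obtain ⟨h1, h2, h3⟩ := (pvSp_succ_iff P j' (P.take (c+1)) (P.getD (c+1) "")).mp hjsp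
          have := hT3 j' (by omega) ⟨by omega, h3⟩
          omega)
    obtain ⟨hs1, hs2, hs3⟩ := hstep
    set k2 := pvStep P st.1 st.2 (P.getD (c+1) "") with hk2
    have hbs : pvBuildStep P st (c+1) = (st.1.set (c+1) k2, k2) := by
      simp [pvBuildStep, hk2]
    rw [hbs]
    have hsetlen : (st.1.set (c+1) k2).length = P.length := by
      simp [ihlen]
    refine ⟨hsetlen, ?_, ?_⟩
    · intro q hq
      by_cases hqc : q = c + 1
      · subst hqc
        rw [pvGetD_set_self st.1 (c+1) k2 (by omega)]
        refine ⟨by omega, ?_, ?_⟩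
        · rw [← hsnoc]; exact hs1
        · intro j hj hjsp
          rw [← hsnoc] at hjsp
          exact hs3 j (by omega) hjsp
      · have hq' : q + 1 ≤ c + 1 := by omega
        rw [pvGetD_set_ne st.1 (c+1) q k2 (fun hEq => hqc hEq.symm)]
        exact ihT q hq'
    · rw [pvGetD_set_self st.1 (c+1) k2 (by omega)]

theorem pvTableOK_build (P : List String) (hP : P ≠ []) :
    pvTableOK P (pvBuildFail P).1 P.length := by
  have hlen : 1 ≤ P.length := List.length_pos_of_ne_nil hP
  have h := pvBuild_inv P hP (P.length - 1) (by omega)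
  have heq : P.length - 1 + 1 = P.length := by omega
  have h2 := h.2.1
  rw [heq] at h2
  unfold pvBuildFail
  exact h2

theorem pvFind_range_least (p : Nat → Bool) (N s : Nat) (h1 : s < N) (h2 : p s = true)
    (h3 : ∀ t, t < s → p t = false) : (List.range N).find? p = some s := by
  have hN : N = s + (N - s) := by omega
  rw [hN, List.range_add, List.find?_append]
  have hleft : (List.range s).find? p = none := by
    rw [List.find?_eq_none]
    intro x hx
    simp only [List.mem_range] at hx
    simp [h3 x hx]
  rw [hleft, Option.none_or]
  obtain ⟨d, hd⟩ : ∃ d, N - s = d + 1 := ⟨N - s - 1, by omega⟩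
  rw [hd, List.range_succ_eq_map, List.map_cons]
  have hp : p (s + 0) = true := by simpa using h2
  rw [List.find?_cons_of_pos hp]
  norm_num

-- the scan over the remaining lines computes the global first match
theorem pvScan_lemma (P cl : List String) (F : List Nat) (pre : List Int) (text : List String)
    (hF : pvTableOK P F P.length) :
    ∀ rest i k, text.drop i = rest → i ≤ text.length → k < P.length →
      pvSp P k (text.take i) →
      (∀ j, pvSp P j (text.take i) → j ≤ k) →
      (∀ s, s + P.length ≤ i → ¬ (P <+: text.drop s)) →
      pvScanKmp P F P.length cl pre k i rest =
        ((List.range (text.length + 1 - P.length)).find?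
            (fun s => decide (P <+: text.drop s))).map (pvOutKmp cl pre P.length) := by
  intro rest
  induction rest with
  | nil =>
    intro i k hdrop hi hk hsp hmax hnom
    have hin : i = text.length := by
      have := congrArg List.length hdrop
      simp [List.length_drop] at this
      omega
    simp only [pvScanKmp]
    symm
    rw [Option.map_eq_none_iff, List.find?_eq_none]
    intro s hs
    simp only [List.mem_range] at hs
    simp only [decide_eq_true_eq]
    exact hnom s (by omega)
  | cons line rest' ih =>
    intro i k hdrop hi hk hsp hmax hnom
    have hline : text[i]? = some line := by
      have h0 : (text.drop i)[0]? = some line := by rw [hdrop]; rfl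
      rw [List.getElem?_drop] at h0
      simpa using h0
    have hilt : i < text.length := by
      by_contra hle
      rw [List.getElem?_eq_none (by omega)] at hline
      simp at hline
    have hsnoc : text.take i ++ [line] = text.take (i+1) := by
      rw [List.take_add_one, hline]
      rfl
    have hstep := pvStep_lemma P F line (text.take i) P.length k
      (pvTableOK_mono P F P.length k hF (by omega)) hk hsp (by omega)
      (by
        intro j hjB hjsp
        cases j with
        | zero => omega
        | succ j' =>
          obtain ⟨h1, h2, h3⟩ := (pvSp_succ_iff P j' (text.take i) line).mp hjsp
          have := hmax j' ⟨by omega, h3⟩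
          omega)
    obtain ⟨hs1, hs2, hs3⟩ := hstep
    rw [hsnoc] at hs1 hs3
    set k' := pvStep P F k line with hk'
    have hmax' : ∀ j, pvSp P j (text.take (i+1)) → j ≤ k' := by
      intro j hj
      exact hs3 j hj.1 hj
    simp only [pvScanKmp, ← hk']
    by_cases hkm : k' = P.length
    · rw [if_pos hkm]
      -- a match ends here; it is the first
      have hspm : pvSp P P.length (text.take (i+1)) := hkm ▸ hs1
      have hmle : P.length ≤ i + 1 := by
        have hlen2 := List.IsSuffix.length_le hspm.2
        simp only [List.length_take] at hlen2
        omega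
      set s := i + 1 - P.length with hs
      have hsm : s + P.length = i + 1 := by omega
      have hPsuf : P <:+ text.take (i+1) := by
        have := hspm.2
        rwa [List.take_length] at this
      have hpred : P <+: text.drop s := by
        have hPeq : P = (text.take (i+1)).drop ((text.take (i+1)).length - P.length) :=
          List.suffix_iff_eq_drop.mp hPsuf
        rw [List.length_take] at hPeq
        have hlt : min (i+1) text.length = i + 1 := by omega
        rw [hlt] at hPeq
        rw [List.drop_take] at hPeq
        have : i + 1 - (i + 1 - P.length) = P.length := by omega
        rw [this] at hPeq
        rw [List.prefix_iff_eq_take]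
        rw [← hPeq]
      rw [pvFind_range_least _ _ s (by omega) (by simp [hpred])
        (by
          intro t' ht'
          simp only [decide_eq_false_iff_not]
          exact hnom t' (by omega))]
      rfl
    · rw [if_neg hkm]
      have hk'lt : k' < P.length := by
        have : k' ≤ P.length := hs1.1
        omega
      have hdrop' : text.drop (i+1) = rest' := by
        have : text.drop (i+1) = (text.drop i).drop 1 := by
          rw [List.drop_drop]
        rw [this, hdrop]
        rfl
      refine ih (i+1) k' hdrop' (by omega) hk'lt hs1 hmax' ?_
      intro s hsi
      by_cases hold : s + P.length ≤ i
      · exact hnom s hold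
      · have hsm : s + P.length = i + 1 := by omega
        intro hpre
        have hPeq : P = (text.drop s).take P.length := by
          have := List.prefix_iff_eq_take.mp hpre
          exact this
        have hsuf : pvSp P P.length (text.take (i+1)) := by
          refine ⟨le_refl _, ?_⟩
          rw [List.take_length]
          have h1 : (text.drop s).take P.length = (text.take (i+1)).drop s := by
            rw [List.drop_take]
            congr 1
            omega
          rw [hPeq, h1]
          exact List.drop_suffix s _
        have := hmax' P.length hsuf
        omega

-- ---- assembling both sides ----

theorem pv_main (cl ol : List String) :
    pvLoopA cl (ol.map PySem.Str.rstrip) (ol.length : Int)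
      (PySem.List.pyRange 0 ((cl.length : Int) - (ol.length : Int) + 1) 1)
    = (if ol = [] then some (0, 0, "") else
        pvScanKmp (ol.map PySem.Str.rstrip) ((pvBuildFail (ol.map PySem.Str.rstrip)).1)
          (ol.map PySem.Str.rstrip).length cl
          (cl.foldl (fun pre line => pre ++ [PySem.List.pyGetD pre (-1) 0 + (PySem.Str.len line : Int)]) [0])
          0 0 (cl.map PySem.Str.rstrip)) := by
  by_cases h0 : ol = []
  · subst h0
    rw [if_pos rfl]
    simp only [List.map_nil, List.length_nil, Nat.cast_zero]
    have h1 : (0 : Int) < (cl.length : Int) - 0 + 1 := by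
      have h2 : (0 : Int) ≤ (cl.length : Int) := Int.natCast_nonneg _
      omega
    rw [PySem.List.pyRange_one_cons h1]
    show pvLoopA cl [] 0 _ = _
    simp only [pvLoopA]
    rw [show ((0 : Int) + 0 : Int) = 0 from rfl]
    rw [PySem.List.slice_zero_start, PySem.List.slice_to cl (le_refl (0 : Int))]
    simp [PySem.List.pyRange_one_eq_nil (le_refl (0 : Int))]
    rfl
  · rw [if_neg h0]
    set P := ol.map PySem.Str.rstrip with hPdef
    set text := cl.map PySem.Str.rstrip with htext
    set pre := cl.foldl (fun pre line => pre ++ [PySem.List.pyGetD pre (-1) 0 + (PySem.Str.len line : Int)]) [0] with hpre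
    have hPne : P ≠ [] := by simp [hPdef, h0]
    have hPlen : P.length = ol.length := by simp [hPdef]
    have hTlen : text.length = cl.length := by simp [htext]
    have hm : 0 < P.length := List.length_pos_of_ne_nil hPne
    -- RHS via the scan lemma
    have hscan := pvScan_lemma P cl ((pvBuildFail P).1) pre text (pvTableOK_build P hPne)
      text 0 0 (by simp) (by omega) hm (pvSp_zero P _)
      (by
        intro j hj
        rcases Nat.eq_zero_or_pos j with hj0 | hjpos
        · omega
        · exfalso
          have h2 := hj.2
          simp only [List.take_zero] at h2
          have := List.suffix_nil.mp h2
          have hlen := congrArg List.length this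
          rw [List.length_take] at hlen
          simp only [List.length_nil] at hlen
          omega)
      (by intro s hsle; omega)
    rw [hscan]
    -- LHS via pvLoopA_eq
    rw [pvLoopA_eq]
    set M : Int := (ol.length : Int) with hM
    set N : Int := (cl.length : Int) with hN
    set pA : Int → Bool := fun i =>
      decide (P = (PySem.List.slice cl (some i) (some (i + M))).map PySem.Str.rstrip) with hpA
    set pN : Nat → Bool := fun s => decide (P <+: text.drop s) with hpN
    by_cases hmn : ol.length ≤ cl.length
    · have hKeq : N - M + 1 = ((cl.length + 1 - ol.length : Nat) : Int) := by
        rw [hM, hN]; omega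
      have hcastfun : ∀ s : Nat, pA ((0 : Int) + (s : Int)) = pN s := by
        intro s
        have hzero : ((0 : Int) + (s : Int)) = ((s : Nat) : Int) := by omega
        rw [hzero]
        simp only [hpA, hpN]
        rw [hM]
        rw [pvSliceMap cl s ol.length, ← htext]
        rw [PySem.List.slice_natCast_add]
        rw [decide_eq_decide]
        rw [List.prefix_iff_eq_take, hPlen]
      rw [hKeq, PySem.List.pyRange_one]
      have htoNat : (((cl.length + 1 - ol.length : Nat) : Int) - 0).toNat = cl.length + 1 - ol.length := by
        omega
      rw [htoNat]
      rw [List.find?_map]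
      have hcongr : ((fun i => pA i) ∘ (fun k : Nat => (0 : Int) + (k : Int))) = pN := by
        funext s
        exact hcastfun s
      rw [show text.length + 1 - P.length = cl.length + 1 - ol.length by rw [hPlen, hTlen]]
      rw [hcongr]
      rw [Option.map_map]
      cases hf : List.find? pN (List.range (cl.length + 1 - ol.length)) with
      | none => rfl
      | some s =>
        have hmem := List.mem_of_find?_eq_some hf
        simp only [List.mem_range] at hmem
        have hsm : s + ol.length ≤ cl.length := by omega
        simp only [Option.map_some]
        congr 1
        -- pvOutA at (0 + s) equals pvOutKmp at s
        show pvOutA cl M ((0:Int) + (s:Int)) = pvOutKmp cl pre P.length s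
        have hzero : ((0 : Int) + (s : Int)) = ((s : Nat) : Int) := by omega
        rw [hzero]
        have hch : PySem.List.slice cl (some (s : Int)) (some ((s : Int) + M))
            = (cl.drop s).take ol.length := by
          rw [hM]; exact PySem.List.slice_natCast_add cl s ol.length
        have c1 : ((PySem.List.pyRange 0 (s : Int) 1).map
            (fun j => (PySem.Str.len (PySem.List.pyGetD cl j "") : Int))).sum = pvS cl s :=
          pvSumA cl s (by omega)
        have b1 : PySem.List.pyGetD pre (s : Int) 0 = pvS cl s := by
          rw [hpre]; exact pvPre_get cl s (by omega)
        have b2 : PySem.List.pyGetD pre ((s : Int) + (P.length : Int)) 0 = pvS cl (s + ol.length) := by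
          rw [hPlen, show ((s : Int) + (ol.length : Int)) = ((s + ol.length : Nat) : Int) by push_cast; ring,
             hpre]
          exact pvPre_get cl (s + ol.length) hsm
        have c2 : pvS cl s
            + ((((cl.drop s).take ol.length)).map (fun line => (PySem.Str.len line : Int))).sum
            = pvS cl (s + ol.length) := by
          rw [pvTakeAddSum cl s ol.length]
          congr 1
          rw [show (fun line => (PySem.Str.len line : Int)) = pvLen from rfl]
          rw [List.map_take, List.map_drop]
        have hMP : M = (P.length : Int) := by rw [hM, hPlen]
        simp only [pvOutA, pvOutKmp, hMP, c1, b1, b2]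
        rw [hPlen]
        rw [hch]
        rw [c2]
    · -- pattern longer than text: both searches are empty
      have hA : PySem.List.pyRange 0 (N - M + 1) 1 = [] := by
        apply PySem.List.pyRange_one_eq_nil
        rw [hM, hN]
        omega
      have hB : List.range (text.length + 1 - P.length) = [] := by
        rw [hPlen, hTlen]
        have : cl.length + 1 - ol.length = 0 := by omega
        rw [this]
        rfl
      rw [hA, hB]
      rfl

-- ===== VERDICT (by name: the statement is the Claim_ definition above) =====
theorem find_with_trailing_ws_tolerance_py_spec : Claim_equal_find_with_trailing_ws_tolerance_py := by
  intro content old_lines start_pos _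
  unfold Spec_find_with_trailing_ws_tolerance_py
  unfold find_with_trailing_ws_tolerance_py find_with_trailing_ws_tolerance_py_alt
  have h := pv_main (pvSplitlinesKeepends content) old_lines
  simp only [List.length_map] at h ⊢
  split <;> simp_all
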